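-- pv_equiv track=rewrite | github.com/gamorosino/fixSidecar | update_json_sidecar.py | shot_order_stepped_with_restart
-- ===== SOURCE A (Python) =====
-- def shot_order_stepped_with_restart(offset, step):
--     order = []
--     used = set()
--     for start in range(offset):
--         i = start
--         while i not in used:
--             order.append(i)
--             used.add(i)
--             i = (i + step) % offset
--         if len(used) == offset:
--             break
--     return order
-- ===== SOURCE B (Python) =====
-- def _gcd(a, b):
--     a = abs(a)
--     b = abs(b)
--     while b:
--         a, b = b, a % b
--     return a
--
--
-- def shot_order_stepped_with_restart(offset, step):
--     # Decompose [0, offset) into the g = gcd(step, offset) cycles of the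
--     # map i -> (i + step) % offset; each cycle has length offset // g and
--     # the cycles start exactly at 0, 1, ..., g-1, so no `used` set or
--     # membership test is needed.
--     if offset <= 0:
--         return []
--     g = _gcd(step, offset)
--     length = offset // g
--     order = []
--     for start in range(g):
--         i = start
--         for _ in range(length):
--             order.append(i)
--             i = (i + step) % offset
--     return order
-- ===== Notes on version B (the rewrite author's own statement) =====
-- stated objective: faster
-- what changed: Replaces the used-set cycle traversal with restart attempts at every index by a gcd-based decomposition: the g = gcd(step, offset) cycles of the map i -> (i+step) % offset have length offset // g and start exactly at 0..g-1, so B emits them directly with no `used` set and no membership tests.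
import Mathlib
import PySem

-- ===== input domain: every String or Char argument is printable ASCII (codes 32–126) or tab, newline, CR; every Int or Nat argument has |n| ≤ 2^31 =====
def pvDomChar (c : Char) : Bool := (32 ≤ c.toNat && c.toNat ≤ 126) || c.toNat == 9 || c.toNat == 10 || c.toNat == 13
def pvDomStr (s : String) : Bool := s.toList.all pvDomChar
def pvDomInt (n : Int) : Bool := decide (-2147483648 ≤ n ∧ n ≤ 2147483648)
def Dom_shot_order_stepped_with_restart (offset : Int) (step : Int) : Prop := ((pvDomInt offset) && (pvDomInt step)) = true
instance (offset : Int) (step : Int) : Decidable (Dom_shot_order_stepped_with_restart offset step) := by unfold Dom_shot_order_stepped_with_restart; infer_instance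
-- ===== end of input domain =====

-- B replaces A's used-set cycle traversal (with a restart attempt at every index) by the
-- gcd-based cycle decomposition — the gcd(step, offset) cycles start exactly at 0..g-1 —
-- removing the set and its membership tests (objective: faster, constant factor).

-- ===== PORT A =====
-- the Python `while i not in used` loop; fuel `offset.toNat + 1` always suffices:
-- every iteration adds a fresh element of [0, offset) to `used`
def pvWhileA (offset step : Int) : Nat → Int → List Int → PySem.Set Int → List Int × PySem.Set Int
  | 0, _, order, used => (order, used)
  | fuel+1, i, order, used =>
    if PySem.Set.contains used i then (order, used)
    else pvWhileA offset step fuel (PySem.Int.mod (i + step) offset) (order ++ [i]) (PySem.Set.add used i)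

-- the `for start in range(offset)` loop, with the `break` on len(used) == offset
def pvOuterA (offset step : Int) : List Int → List Int → PySem.Set Int → List Int
  | [], order, _ => order
  | start :: rest, order, used =>
    match pvWhileA offset step (offset.toNat + 1) start order used with
    | (order', used') =>
      if (PySem.Set.len used' : Int) = offset then order'
      else pvOuterA offset step rest order' used'

def shot_order_stepped_with_restart (offset : Int) (step : Int) : List Int :=
  pvOuterA offset step (PySem.List.pyRange 0 offset 1) [] PySem.Set.empty

-- ===== PORT B =====
-- Source B's _gcd loop `while b: a, b = b, a % b`; fuel b+1 suffices (b strictly decreases)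
def pvGcdGo : Nat → Nat → Nat → Nat
  | 0, a, _ => a
  | fuel+1, a, b => if b = 0 then a else pvGcdGo fuel b (a % b)

-- Source B's _gcd: abs both arguments, then the Euclid loop (on nonnegative ints = Nat)
def pvGcdB (a b : Int) : Int := (pvGcdGo (b.natAbs + 1) a.natAbs b.natAbs : Int)

def shot_order_stepped_with_restart_alt (offset : Int) (step : Int) : List Int :=
  if offset ≤ 0 then []
  else
    let g := pvGcdB step offset
    let length := PySem.Int.floordiv offset g
    (PySem.List.pyRange 0 g 1).foldl (fun order start =>
      ((PySem.List.pyRange 0 length 1).foldl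
        (fun (st : List Int × Int) _ => (st.1 ++ [st.2], PySem.Int.mod (st.2 + step) offset))
        (order, start)).1) []

-- ===== PRECONDITION & SPEC =====
def Spec_shot_order_stepped_with_restart (offset : Int) (step : Int) (out : List Int) : Prop := out = shot_order_stepped_with_restart_alt offset step
instance (offset : Int) (step : Int) (out : List Int) : Decidable (Spec_shot_order_stepped_with_restart offset step out) := by unfold Spec_shot_order_stepped_with_restart; infer_instance

-- ===== CLAIM (what is proved, stated in full; the proofs are below) =====
def Claim_equal_shot_order_stepped_with_restart : Prop := ∀ (offset : Int) (step : Int), Dom_shot_order_stepped_with_restart offset step → Spec_shot_order_stepped_with_restart offset step (shot_order_stepped_with_restart offset step)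

-- ===== LEMMAS AND PROOFS =====

def pvC (m step s : Int) (k : Nat) : Int := (s + k * step) % m
def pvCyc (m step : Int) (L : Nat) (s : Int) : List Int := (List.range L).map (pvC m step s)

lemma pvC_succ {m step s : Int} (hm : 0 < m) (k : Nat) :
    PySem.Int.mod (pvC m step s k + step) m = pvC m step s (k + 1) := by
  rw [PySem.Int.mod_eq_emod_of_pos hm]
  unfold pvC
  rw [Int.emod_add_emod]
  congr 1
  push_cast
  ring

lemma set_contains_true {s : List Int} {x : Int} (h : x ∈ s) : PySem.Set.contains s x = true := by
  simp [PySem.Set.contains, h]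

lemma set_contains_false {s : List Int} {x : Int} (h : x ∉ s) : PySem.Set.contains s x = false := by
  simp [PySem.Set.contains, h]

lemma set_add_fresh {s : List Int} {x : Int} (h : x ∉ s) : PySem.Set.add s x = s ++ [x] := by
  simp [PySem.Set.add]; exact h

lemma whileA_run {m step : Int} (hm : 0 < m) {L : Nat} (hLpos : 0 < L) (s : Int)
    (hper : pvC m step s L = pvC m step s 0)
    (hinj : ∀ k1 k2, k1 < k2 → k2 < L → pvC m step s k1 ≠ pvC m step s k2)
    (order : List Int)
    (hfresh : ∀ k, k < L → pvC m step s k ∉ order) :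
    ∀ fuel j, j ≤ L → L + 1 - j ≤ fuel →
    pvWhileA m step fuel (pvC m step s j)
      (order ++ (List.range j).map (pvC m step s)) (order ++ (List.range j).map (pvC m step s))
    = (order ++ pvCyc m step L s, order ++ pvCyc m step L s) := by
  intro fuel
  induction fuel with
  | zero => intro j hj hf; omega
  | succ fuel ih =>
    intro j hj hf
    by_cases hjL : j = L
    · subst hjL
      have hmem : pvC m step s j ∈ order ++ (List.range j).map (pvC m step s) := by
        rw [hper]
        exact List.mem_append_right _ (List.mem_map.mpr ⟨0, List.mem_range.mpr hLpos, rfl⟩)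
      simp only [pvWhileA, set_contains_true hmem, if_true]
      simp [pvCyc]
    · have hjlt : j < L := by omega
      have hnot : pvC m step s j ∉ order ++ (List.range j).map (pvC m step s) := by
        intro hmem
        rcases List.mem_append.mp hmem with h | h
        · exact hfresh j hjlt h
        · rcases List.mem_map.mp h with ⟨k, hk, hkeq⟩
          exact hinj k j (List.mem_range.mp hk) hjlt hkeq
      simp only [pvWhileA, set_contains_false hnot, if_false, Bool.false_eq_true]
      rw [set_add_fresh hnot, pvC_succ hm]
      have hordeq : order ++ (List.range j).map (pvC m step s) ++ [pvC m step s j]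
          = order ++ (List.range (j+1)).map (pvC m step s) := by
        rw [List.range_succ, List.map_append, List.map_singleton, List.append_assoc]
      rw [hordeq]
      exact ih (j+1) (by omega) (by omega)

def pvFull (m step : Int) (L g : Nat) : List Int :=
  (List.range g).flatMap (fun (s : Nat) => pvCyc m step L ((s : Int)))

lemma pvC_zero {m step s : Int} (h0 : 0 ≤ s) (h1 : s < m) : pvC m step s 0 = s := by
  simp [pvC]; exact Int.emod_eq_of_lt h0 h1

lemma pvC_residue {m step s : Int} {g : Int} (hgm : g ∣ m) (hgs : g ∣ step) (k : Nat) :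
    pvC m step s k % g = s % g := by
  unfold pvC
  rw [Int.emod_emod_of_dvd _ hgm]
  obtain ⟨t, ht⟩ := hgs
  subst ht
  have h : s + (k : Int) * (g * t) = s + g * ((k : Int) * t) := by ring
  rw [h, Int.add_mul_emod_self_left]

lemma pvFull_succ (m step : Int) (L s : Nat) :
    pvFull m step L (s + 1) = pvFull m step L s ++ pvCyc m step L (s : Int) := by
  unfold pvFull
  simp [List.range_succ]

lemma pvFull_length (m step : Int) (L g : Nat) : (pvFull m step L g).length = g * L := by
  induction g with
  | zero => simp [pvFull]
  | succ n ih =>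
    rw [pvFull_succ, List.length_append, ih]
    simp [pvCyc]
    ring

lemma pvFull_fresh {m step : Int} {gI : Int} (hgm : gI ∣ m) (hgs : gI ∣ step)
    {g L snat : Nat} (hgsz : (g : Int) = gI) (hs : snat < g) :
    ∀ k, k < L → pvC m step (snat : Int) k ∉ pvFull m step L snat := by
  intro k _ hmem
  unfold pvFull pvCyc at hmem
  rcases List.mem_flatMap.mp hmem with ⟨s', hs', hmm⟩
  rcases List.mem_map.mp hmm with ⟨k', _, heq⟩
  have hs'lt : s' < snat := List.mem_range.mp hs'
  have h1 : pvC m step (s' : Int) k' % gI = (s' : Int) % gI := pvC_residue hgm hgs k'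
  have h2 : pvC m step (snat : Int) k % gI = (snat : Int) % gI := pvC_residue hgm hgs k
  rw [heq, h2] at h1
  rw [Int.emod_eq_of_lt (by positivity) (by rw [← hgsz]; exact_mod_cast hs),
      Int.emod_eq_of_lt (by positivity) (by rw [← hgsz]; exact_mod_cast hs'lt.trans hs)] at h1
  omega


lemma pvC_period {m step s : Int} (hm : 0 < m) {g : Nat} (hg : (g:Int) = (Int.gcd step m : Int))
    {L : Nat} (hL : (L : Int) = m / (g:Int)) : pvC m step s L = pvC m step s 0 := by
  have hgm : (g:Int) ∣ m := by rw [hg]; exact Int.gcd_dvd_right step m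
  have hgs : (g:Int) ∣ step := by rw [hg]; exact Int.gcd_dvd_left step m
  have hg0 : (0:Int) < g := by
    rw [hg]; exact_mod_cast Int.gcd_pos_of_ne_zero_right step (by omega)
  obtain ⟨t, ht⟩ := hgs
  obtain ⟨u, hu⟩ := hgm
  have hLu : (L : Int) = u := by
    rw [hL, hu, Int.mul_ediv_cancel_left _ (by omega)]
  unfold pvC
  have h2 : s + (L : Int) * step = s + m * t := by
    rw [hLu, ht, hu]; ring
  rw [h2, Int.add_mul_emod_self_left]
  simp

lemma pvC_inj {m step s : Int} (hm : 0 < m) {g : Nat} (hg : (g:Int) = (Int.gcd step m : Int))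
    {L : Nat} (hL : (L : Int) = m / (g:Int)) {k1 k2 : Nat} (h12 : k1 < k2) (h2 : k2 < L) :
    pvC m step s k1 ≠ pvC m step s k2 := by
  intro heq
  have hgm : (g:Int) ∣ m := by rw [hg]; exact Int.gcd_dvd_right step m
  have hgs : (g:Int) ∣ step := by rw [hg]; exact Int.gcd_dvd_left step m
  have hg0 : (0:Int) < g := by
    rw [hg]; exact_mod_cast Int.gcd_pos_of_ne_zero_right step (by omega)
  obtain ⟨t, ht⟩ := hgs
  obtain ⟨u, hu⟩ := hgm
  have hk12 : (k1 : Int) < (k2 : Int) := by exact_mod_cast h12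
  have hmdvd : m ∣ ((k2 : Int) - (k1 : Int)) * step := by
    have hmod : (s + (k1:Int) * step) ≡ (s + (k2:Int) * step) [ZMOD m] := heq
    have hd := hmod.dvd
    have h3 : (s + (k2:Int) * step) - (s + (k1:Int) * step) = ((k2 : Int) - (k1 : Int)) * step := by ring
    rwa [h3] at hd
  have ht' : t = step / (g:Int) := by rw [ht, Int.mul_ediv_cancel_left _ (by omega)]
  have hu' : u = m / (g:Int) := by rw [hu, Int.mul_ediv_cancel_left _ (by omega)]
  have hcop : Int.gcd t u = 1 := by
    rw [ht', hu', hg]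
    exact Int.gcd_ediv_gcd_ediv_gcd (i := step) (j := m)
      (Int.gcd_pos_of_ne_zero_right step (by omega))
  have hudvd : u ∣ ((k2 : Int) - (k1 : Int)) * t := by
    have hh : (g:Int) * u ∣ (g:Int) * (((k2 : Int) - (k1 : Int)) * t) := by
      rw [← hu]
      have he : (g:Int) * (((k2 : Int) - (k1:Int)) * t) = ((k2 : Int) - (k1:Int)) * step := by rw [ht]; ring
      rw [he]; exact hmdvd
    exact (mul_dvd_mul_iff_left (by omega : (g:Int) ≠ 0)).mp hh
  have hut : u ∣ ((k2 : Int) - (k1 : Int)) :=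
    Int.dvd_of_dvd_mul_left_of_gcd_one hudvd (by rwa [Int.gcd_comm])
  have hule : u ≤ (k2 : Int) - (k1 : Int) := Int.le_of_dvd (by omega) hut
  have hLu : (L : Int) = u := by
    rw [hL, hu, Int.mul_ediv_cancel_left _ (by omega)]
  have hk2L : (k2 : Int) < (L : Int) := by exact_mod_cast h2
  omega

lemma set_len_eq (l : List Int) : PySem.Set.len l = (l.length : Int) := by
  simp [PySem.Set.len]

lemma outerA_run {m step : Int} (hm : 0 < m) {g L : Nat}
    (hg : (g : Int) = (Int.gcd step m : Int)) (hL : (L : Int) = m / (g : Int)) :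
    ∀ n snat, snat + n = g → snat < g →
    pvOuterA m step (PySem.List.pyRange (snat : Int) m) (pvFull m step L snat) (pvFull m step L snat)
    = pvFull m step L g := by
  have hgm : (g : Int) ∣ m := by rw [hg]; exact Int.gcd_dvd_right step m
  have hgs : (g : Int) ∣ step := by rw [hg]; exact Int.gcd_dvd_left step m
  have hg0 : 0 < g := by
    have := Int.gcd_pos_of_ne_zero_right step (show m ≠ 0 by omega)
    exact_mod_cast hg ▸ (by exact_mod_cast this : (0:Int) < (Int.gcd step m : Int))
  have hgmC := hgm
  obtain ⟨u, hu⟩ := hgmC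
  have hLu : (L : Int) = u := by rw [hL, hu, Int.mul_ediv_cancel_left _ (by exact_mod_cast hg0.ne')]
  have hgLm : ((g * L : Nat) : Int) = m := by push_cast; rw [hLu, ← hu]
  have hL0 : 0 < L := by
    rcases Nat.eq_zero_or_pos L with h | h
    · exfalso; rw [h] at hgLm; simp at hgLm; omega
    · exact h
  have hLm : L ≤ m.toNat := by
    have h1 : g * L = m.toNat := by omega
    have h2 : L ≤ g * L := Nat.le_mul_of_pos_left L hg0
    omega
  intro n
  induction n with
  | zero => intro snat h1 h2; omega
  | succ n ih =>
    intro snat h1 h2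
    have hsm : (snat : Int) < m := by
      rw [← hgLm]
      have : snat < g * L := lt_of_lt_of_le h2 (Nat.le_mul_of_pos_right g hL0)
      exact_mod_cast this
    rw [PySem.List.pyRange_one_cons hsm]
    show pvOuterA m step _ _ _ = _
    have hrun := whileA_run hm hL0 ((snat : Int))
      (pvC_period hm hg hL) (fun k1 k2 hk1 hk2 => pvC_inj hm hg hL hk1 hk2)
      (pvFull m step L snat) (pvFull_fresh hgm hgs rfl h2)
      (m.toNat + 1) 0 (by omega) (by omega)
    rw [pvC_zero (by positivity) hsm] at hrun
    simp only [List.range_zero, List.map_nil, List.append_nil] at hrun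
    simp only [pvOuterA, hrun]
    rw [show pvFull m step L snat ++ pvCyc m step L (snat : Int) = pvFull m step L (snat + 1) from
      (pvFull_succ m step L snat).symm]
    rw [set_len_eq, pvFull_length]
    by_cases hend : snat + 1 = g
    · rw [if_pos (by rw [hend]; exact hgLm), hend]
    · rw [if_neg (by
        intro hcol
        have : ((snat+1) * L : Nat) = (g * L : Nat) := by exact_mod_cast hcol.trans hgLm.symm
        exact hend (Nat.eq_of_mul_eq_mul_right hL0 this))]
      have : ((snat : Int) + 1) = (((snat + 1 : Nat)) : Int) := by push_cast; ring
      rw [this]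
      exact ih (snat + 1) (by omega) (by omega)

lemma pvGcdGo_eq : ∀ (fuel a b : Nat), b < fuel → pvGcdGo fuel a b = Nat.gcd b a := by
  intro fuel
  induction fuel with
  | zero => intro a b h; omega
  | succ fuel ih =>
    intro a b h
    by_cases hb : b = 0
    · subst hb; simp [pvGcdGo]
    · rw [show pvGcdGo (fuel+1) a b = pvGcdGo fuel b (a % b) by simp [pvGcdGo, hb]]
      rw [ih b (a % b) (by have := Nat.mod_lt a (Nat.pos_of_ne_zero hb); omega)]
      exact (Nat.gcd_rec b a).symm

lemma pvGcdB_eq (a b : Int) : pvGcdB a b = (Int.gcd a b : Int) := by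
  unfold pvGcdB
  rw [pvGcdGo_eq _ _ _ (by omega), Nat.gcd_comm]
  rfl

lemma innerB_fold {m step : Int} (hm : 0 < m) (s : Int) (l : List Int) :
    ∀ (j : Nat) (ord : List Int),
    l.foldl (fun (st : List Int × Int) _ => (st.1 ++ [st.2], PySem.Int.mod (st.2 + step) m))
      (ord, pvC m step s j)
    = (ord ++ (List.range l.length).map (fun k => pvC m step s (j + k)), pvC m step s (j + l.length)) := by
  induction l with
  | nil => intro j ord; simp
  | cons x t ih =>
    intro j ord
    simp only [List.foldl_cons, pvC_succ hm]
    rw [ih (j+1) (ord ++ [pvC m step s j])]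
    simp [List.range_succ_eq_map, List.map_map, Function.comp_def,
          Nat.add_comm, Nat.add_left_comm, List.append_assoc]

lemma altB_eq {m step : Int} (hm : 0 < m) {g L : Nat}
    (hg : (g : Int) = (Int.gcd step m : Int)) (hL : (L : Int) = m / (g : Int)) :
    shot_order_stepped_with_restart_alt m step = pvFull m step L g := by
  have hg0 : (0:Int) < (g:Int) := by
    rw [hg]; exact_mod_cast Int.gcd_pos_of_ne_zero_right step (by omega)
  have hgm : (g:Int) ∣ m := by rw [hg]; exact Int.gcd_dvd_right step m
  have hgmC := hgm
  obtain ⟨u, hu⟩ := hgmC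
  have hLu : (L : Int) = u := by rw [hL, hu, Int.mul_ediv_cancel_left _ (by omega)]
  have hgLm : ((g * L : Nat) : Int) = m := by push_cast; rw [hLu, ← hu]
  have hL0 : 0 < L := by
    rcases Nat.eq_zero_or_pos L with h | h
    · exfalso; rw [h] at hgLm; simp at hgLm; omega
    · exact h
  unfold shot_order_stepped_with_restart_alt
  rw [if_neg (by omega)]
  have hgB : pvGcdB step m = (g : Int) := by rw [pvGcdB_eq]; exact hg.symm
  simp only [hgB]
  have hflo : PySem.Int.floordiv m (g:Int) = (L : Int) := by
    rw [PySem.Int.floordiv_eq_ediv_of_pos hg0, hL]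
  simp only [hflo]
  rw [PySem.List.pyRange_one 0 (g:Int)]
  rw [show (((g:Int) - 0).toNat) = g by omega]
  rw [List.foldl_map]
  rw [PySem.List.foldl_congr_mem (List.range g) _
    (fun (order : List Int) (k : Nat) => order ++ pvCyc m step L (k : Int)) [] ?_]
  · rw [PySem.List.foldl_append_eq_flatMap]
    rfl
  · intro acc k hk
    have hkg : k < g := List.mem_range.mp hk
    have hkm : (k : Int) < m := by
      rw [← hgLm]
      exact_mod_cast lt_of_lt_of_le hkg (Nat.le_mul_of_pos_right g hL0)
    have h0k : (0:Int) + (k:Int) = pvC m step (k:Int) 0 := by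
      rw [pvC_zero (by positivity) hkm]; ring
    rw [h0k, innerB_fold hm (k:Int) _ 0 acc]
    rw [show (PySem.List.pyRange 0 (L:Int)).length = L by
      rw [PySem.List.length_pyRange_one]; omega]
    simp [pvCyc]

lemma emptyRange (offset : Int) (h : offset ≤ 0) : PySem.List.pyRange 0 offset = [] := by
  rw [PySem.List.pyRange_one, show (offset - 0).toNat = 0 by omega]
  rfl

lemma pvPorts_eq (offset step : Int) :
    pvOuterA offset step (PySem.List.pyRange 0 offset 1) [] PySem.Set.empty
      = shot_order_stepped_with_restart_alt offset step := by
  by_cases hm : offset ≤ 0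
  · unfold shot_order_stepped_with_restart_alt
    rw [if_pos hm, emptyRange offset hm]
    rfl
  · have hm : 0 < offset := by omega
    have hg : ((Int.gcd step offset : Nat) : Int) = (Int.gcd step offset : Int) := rfl
    have hL : (((offset / (Int.gcd step offset : Int)).toNat : Nat) : Int)
        = offset / ((Int.gcd step offset : Nat) : Int) := by
      exact Int.toNat_of_nonneg (Int.ediv_nonneg (by omega)
        (by exact_mod_cast Nat.zero_le _))
    have hg0 : 0 < Int.gcd step offset := Int.gcd_pos_of_ne_zero_right step (by omega)
    rw [altB_eq hm hg hL]
    have hrun := outerA_run hm hg hL (Int.gcd step offset) 0 (by omega) hg0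
    simpa [pvFull, PySem.Set.empty] using hrun

-- ===== VERDICT (by name: the statement is the Claim_ definition above) =====
theorem shot_order_stepped_with_restart_spec : Claim_equal_shot_order_stepped_with_restart := by
  intro offset step _
  unfold Spec_shot_order_stepped_with_restart shot_order_stepped_with_restart
  exact pvPorts_eq offset step
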